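-- pv_equiv track=rewrite | github.com/GEOS-DEV/GEOS | scripts/makeSampleMeshFilesCuboctahedral.py | translate_faces
-- ===== SOURCE A (Python) =====
-- def translate_faces(faces, index_map):
--     translated = list()
--     offsets = list()
--     count = 0
--
--     for facelist in faces:
--         temp_list = [len(facelist)]
--         count += 1
--
--         for face in facelist:
--             temp_list.append(len(face))
--             temp_list.extend([index_map[point] for point in face])
--             count += len(face) + 1
--         translated.extend(temp_list)
--         offsets.append(count)
--
--     return translated, offsets
-- ===== SOURCE B (Python) =====
-- def translate_faces(faces, index_map):
--     # Pass 1: encode the stream (no counter maintained).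
--     translated = []
--     for facelist in faces:
--         translated.append(len(facelist))
--         for face in facelist:
--             translated.append(len(face))
--             translated += [index_map[point] for point in face]
--     # Pass 2: recover the offsets by decoding the self-delimiting stream:
--     # each record starts with a face count, each face with its point count.
--     offsets = []
--     pos = 0
--     n = len(translated)
--     while pos < n:
--         k = translated[pos]
--         pos += 1
--         for _ in range(k):
--             pos += translated[pos] + 1
--         offsets.append(pos)
--     return translated, offsets
-- ===== Notes on version B (the rewrite author's own statement) =====
-- stated objective: alternative
-- what changed: B drops A's running count accumulator entirely: it first encodes the flat stream, then recovers the offsets in a second pass by parsing the self-delimiting stream with a cursor (read face count, skip each face's point count), instead of counting while encoding.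
import Mathlib
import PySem

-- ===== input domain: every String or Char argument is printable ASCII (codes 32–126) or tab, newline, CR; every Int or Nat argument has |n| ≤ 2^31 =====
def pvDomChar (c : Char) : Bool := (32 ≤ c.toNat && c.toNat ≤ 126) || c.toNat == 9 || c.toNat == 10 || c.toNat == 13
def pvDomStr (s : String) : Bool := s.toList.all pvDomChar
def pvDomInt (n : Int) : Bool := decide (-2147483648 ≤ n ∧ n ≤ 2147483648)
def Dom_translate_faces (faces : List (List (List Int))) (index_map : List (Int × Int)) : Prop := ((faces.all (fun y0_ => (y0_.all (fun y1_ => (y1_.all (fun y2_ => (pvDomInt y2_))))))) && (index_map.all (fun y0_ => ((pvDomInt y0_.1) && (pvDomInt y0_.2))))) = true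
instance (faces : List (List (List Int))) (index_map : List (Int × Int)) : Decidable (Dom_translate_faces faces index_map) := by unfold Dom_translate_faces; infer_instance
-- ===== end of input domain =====

-- B drops A's running `count` accumulator: it encodes the flat stream first, then recovers the
-- offsets in a second pass by parsing the self-delimiting stream with a cursor (objective: alternative).


-- dict lookup index_map[point]; Pre_ guarantees the key is present, so the getD default is never reached
def pvLookup (index_map : List (Int × Int)) (point : Int) : Int :=
  ((PySem.Dict.mk index_map).get? point).getD 0

-- ===== PORT A =====
-- A's outer-loop body: build temp_list via the inner loop (running count threaded through),
-- extend translated, append count to offsets.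
def stepA (index_map : List (Int × Int)) (st : List Int × List Int × Int)
    (facelist : List (List Int)) : List Int × List Int × Int :=
  let count := st.2.2 + 1
  let inner := facelist.foldl (fun (p : List Int × Int) face =>
      (p.1 ++ [(face.length : Int)] ++ face.map (pvLookup index_map),
       p.2 + (face.length : Int) + 1))
    (([(facelist.length : Int)] : List Int), count)
  (st.1 ++ inner.1, st.2.1 ++ [inner.2], inner.2)

def translate_faces (faces : List (List (List Int))) (index_map : List (Int × Int)) : List Int × List Int :=
  let st := faces.foldl (stepA index_map) (([], [], 0) : List Int × List Int × Int)
  (st.1, st.2.1)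

-- ===== PORT B =====
-- pass 1: encode the stream, no counter (Python B's two nested append loops)
def encStep (index_map : List (Int × Int)) (acc : List Int) (facelist : List (List Int)) : List Int :=
  facelist.foldl (fun a face => a ++ [(face.length : Int)] ++ face.map (pvLookup index_map))
    (acc ++ [(facelist.length : Int)])

-- pass 2: the stream decoder.  skipK k l p = Python's `for _ in range(k): pos += translated[pos] + 1`
-- over the remaining stream l with cursor p (list-suffix view of the cursor; the stored point
-- counts are nonnegative naturals on every stream B actually builds, so .toNat is exact there).
def skipK : Nat → List Int → Int → List Int × Int
  | 0, l, p => (l, p)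
  | _ + 1, [], p => ([], p)
  | n + 1, m :: l, p => skipK n (l.drop m.toNat) (p + m + 1)

lemma skipK_len : ∀ (n : Nat) (l : List Int) (p : Int), (skipK n l p).1.length ≤ l.length := by
  intro n
  induction n with
  | zero => intro l p; simp [skipK]
  | succ n ih =>
    intro l p
    cases l with
    | nil => simp [skipK]
    | cons m l =>
      calc (skipK (n + 1) (m :: l) p).1.length ≤ (l.drop m.toNat).length := ih _ _
        _ ≤ (m :: l).length := by simp; omega

-- Python B's while loop: read a face count, skip that many faces, emit the cursor as an offset.
def decode : List Int → Int → List Int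
  | [], _ => []
  | k :: rest, p =>
    let r := skipK k.toNat rest (p + 1)
    r.2 :: decode r.1 r.2
termination_by l _ => l.length
decreasing_by
  calc r.1.length ≤ rest.length := skipK_len _ _ _
    _ < (k :: rest).length := by simp

def translate_faces_alt (faces : List (List (List Int))) (index_map : List (Int × Int)) : List Int × List Int :=
  let translated := faces.foldl (encStep index_map) []
  (translated, decode translated 0)

-- ===== PRECONDITION & SPEC =====
-- Pre_ excludes exactly the inputs where Python A raises KeyError: a face point absent from index_map.
def Pre_translate_faces (faces : List (List (List Int))) (index_map : List (Int × Int)) : Prop :=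
  ∀ facelist ∈ faces, ∀ face ∈ facelist, ∀ point ∈ face, point ∈ index_map.map Prod.fst
instance (faces : List (List (List Int))) (index_map : List (Int × Int)) : Decidable (Pre_translate_faces faces index_map) := by unfold Pre_translate_faces; infer_instance
def pvWitness_translate_faces : List (List (List Int)) × (List (Int × Int)) :=
  ([[], [[0], [1, 2]]], [(0, 7), (1, 8), (2, 9)])
def Spec_translate_faces (faces : List (List (List Int))) (index_map : List (Int × Int)) (out : List Int × List Int) : Prop := out = translate_faces_alt faces index_map
instance (faces : List (List (List Int))) (index_map : List (Int × Int)) (out : List Int × List Int) : Decidable (Spec_translate_faces faces index_map out) := by unfold Spec_translate_faces; infer_instance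

-- ===== CLAIM (what is proved, stated in full; the proofs are below) =====
def Claim_equal_translate_faces : Prop := ∀ (faces : List (List (List Int))) (index_map : List (Int × Int)), Dom_translate_faces faces index_map → Pre_translate_faces faces index_map → Spec_translate_faces faces index_map (translate_faces faces index_map)

-- ===== LEMMAS AND PROOFS =====

-- the stream record of one facelist
def pvSegment (index_map : List (Int × Int)) (facelist : List (List Int)) : List Int :=
  (facelist.length : Int) ::
    facelist.flatMap (fun face => (face.length : Int) :: face.map (pvLookup index_map))

-- the intended offsets: running positions after each segment
def offs : List (List Int) → Int → List Int
  | [], _ => []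
  | seg :: segs, p => (p + (seg.length : Int)) :: offs segs (p + (seg.length : Int))

-- A's inner loop over a facelist appends exactly the tail of the segment and advances
-- count by that tail's length.
lemma inner_fold_eq (index_map : List (Int × Int)) (facelist : List (List Int))
    (acc : List Int) (c : Int) :
    facelist.foldl (fun (p : List Int × Int) face =>
        (p.1 ++ [(face.length : Int)] ++ face.map (pvLookup index_map),
         p.2 + (face.length : Int) + 1)) (acc, c)
    = (acc ++ facelist.flatMap (fun face => (face.length : Int) :: face.map (pvLookup index_map)),
       c + ((facelist.flatMap (fun face => (face.length : Int) :: face.map (pvLookup index_map))).length : Int)) := by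
  induction facelist generalizing acc c with
  | nil => simp
  | cons face rest ih =>
    simp only [List.foldl_cons, List.flatMap_cons, ih, Prod.mk.injEq]
    constructor
    · simp
    · simp only [List.length_append, List.length_cons, List.length_map]; push_cast; ring

-- one application of A's outer-loop body, in terms of the segment
lemma stepA_eq (index_map : List (Int × Int)) (st : List Int × List Int × Int)
    (facelist : List (List Int)) :
    stepA index_map st facelist
    = (st.1 ++ pvSegment index_map facelist,
       st.2.1 ++ [st.2.2 + ((pvSegment index_map facelist).length : Int)],
       st.2.2 + ((pvSegment index_map facelist).length : Int)) := by
  have h : st.2.2 + 1 + ((facelist.flatMap (fun face => (face.length : Int) :: face.map (pvLookup index_map))).length : Int)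
      = st.2.2 + ((pvSegment index_map facelist).length : Int) := by
    simp only [pvSegment, List.length_cons]; push_cast; ring
  simp only [stepA, inner_fold_eq, h, pvSegment]
  simp

-- A's whole loop, in terms of segments and offs
lemma outer_fold_eq (index_map : List (Int × Int)) (fs : List (List (List Int)))
    (tr off : List Int) (c : Int) :
    fs.foldl (stepA index_map) (tr, off, c)
    = (tr ++ (fs.map (pvSegment index_map)).flatten,
       off ++ offs (fs.map (pvSegment index_map)) c,
       c + (((fs.map (pvSegment index_map)).flatten.length : Nat) : Int)) := by
  induction fs generalizing tr off c with
  | nil => simp [offs]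
  | cons fl rest ih =>
    rw [List.foldl_cons, stepA_eq, ih, List.map_cons, List.flatten_cons]
    simp only [offs, Prod.mk.injEq]
    refine ⟨by simp, by simp, ?_⟩
    simp only [List.length_append]; push_cast; ring

-- B's encoder over a facelist = acc ++ segment tail
lemma encInner_eq (index_map : List (Int × Int)) (facelist : List (List Int)) (acc : List Int) :
    facelist.foldl (fun a face => a ++ [(face.length : Int)] ++ face.map (pvLookup index_map)) acc
    = acc ++ facelist.flatMap (fun face => (face.length : Int) :: face.map (pvLookup index_map)) := by
  induction facelist generalizing acc with
  | nil => simp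
  | cons face rest ih => simp [List.flatMap]

-- B's encoder = flattened segments
lemma enc_eq (index_map : List (Int × Int)) (fs : List (List (List Int))) (acc : List Int) :
    fs.foldl (encStep index_map) acc = acc ++ (fs.map (pvSegment index_map)).flatten := by
  induction fs generalizing acc with
  | nil => simp
  | cons fl rest ih =>
    simp only [List.foldl_cons, encStep, encInner_eq, ih, List.map_cons, List.flatten_cons,
      pvSegment]
    simp

-- the decoder's inner skip consumes exactly one segment tail
lemma skipK_spec (index_map : List (Int × Int)) (facelist : List (List Int))
    (rest : List Int) (p : Int) :
    skipK facelist.length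
      (facelist.flatMap (fun face => (face.length : Int) :: face.map (pvLookup index_map)) ++ rest) p
    = (rest, p + ((facelist.flatMap (fun face => (face.length : Int) :: face.map (pvLookup index_map))).length : Int)) := by
  induction facelist generalizing p with
  | nil => simp [skipK]
  | cons face fl ih =>
    simp only [List.length_cons, List.flatMap_cons, List.cons_append, List.append_assoc, skipK,
      Int.toNat_natCast]
    rw [List.drop_left' (by simp)]
    rw [ih]
    simp only [List.length_append, List.length_map, Prod.mk.injEq, true_and]
    push_cast; ring

-- the decoder on a flattened segment list produces offs
lemma decode_flatten (index_map : List (Int × Int)) (fs : List (List (List Int))) (p : Int) :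
    decode ((fs.map (pvSegment index_map)).flatten) p = offs (fs.map (pvSegment index_map)) p := by
  induction fs generalizing p with
  | nil => simp [decode, offs]
  | cons fl rest ih =>
    simp only [List.map_cons, List.flatten_cons, pvSegment, List.cons_append, decode,
      Int.toNat_natCast, skipK_spec, ih]
    simp only [offs, List.length_cons]
    push_cast
    ring_nf

-- ===== VERDICT (by name: the statement is the Claim_ definition above) =====
theorem translate_faces_spec : Claim_equal_translate_faces := by
  intro faces index_map _ _
  unfold Spec_translate_faces translate_faces translate_faces_alt
  simp only [outer_fold_eq, enc_eq, List.nil_append, decode_flatten]
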